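-- pv_equiv track=rewrite | github.com/willhardy/shortest-distance | shortest_distance.py | parse_content
-- ===== SOURCE A (Python) =====
-- import string
--
-- def tokenize(lines):
--     """ Tokenize the given file by words.
--
--     This task is done separately because tokenization can be done a number of
--     different ways and often needs to be customised. I've just done something
--     very simple here: split by whitespace, remove punctuation and case.
--     """
--     for line in lines:
--         for word in line.split():
--             yield word.strip(string.punctuation).casefold()
--
-- def parse_content(lines, start, end):
--     """ Parse the given file and return a data structure that we can use.
--
--     This data structure will be two lists of all the positions of the start and
--     end words.
--     """
--
--     # Initialise our output data structure (a list of positions for each word)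
--     start_positions = []
--     end_positions = []
--
--     # Add the position of any relevant words
--     for i, token in enumerate(tokenize(lines)):
--         # Always include the start position if listed
--         # Only add end positions if we have already seen a start position
--         if token == start:
--             start_positions.append(i)
--         if start_positions and token == end:
--             end_positions.append(i)
--
--     return start_positions, end_positions
-- ===== SOURCE B (Python) =====
-- import string
--
-- def tokenize(lines):
--     for line in lines:
--         for word in line.split():
--             yield word.strip(string.punctuation).casefold()
--
-- def parse_content(lines, start, end):
--     tokens = list(tokenize(lines))
--     start_positions = [i for i, t in enumerate(tokens) if t == start]
--     if not start_positions:
--         return start_positions, []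
--     first = start_positions[0]
--     end_positions = [i for i, t in enumerate(tokens) if t == end and i >= first]
--     return start_positions, end_positions
-- ===== Notes on version B (the rewrite author's own statement) =====
-- stated objective: simpler
-- what changed: Replaces A's single stateful pass (mutable lists with a 'have we seen a start yet' gate) by materializing the token list once, collecting start indices in one comprehension, and keying the end-index comprehension on the first start index (i >= first).
import Mathlib
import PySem

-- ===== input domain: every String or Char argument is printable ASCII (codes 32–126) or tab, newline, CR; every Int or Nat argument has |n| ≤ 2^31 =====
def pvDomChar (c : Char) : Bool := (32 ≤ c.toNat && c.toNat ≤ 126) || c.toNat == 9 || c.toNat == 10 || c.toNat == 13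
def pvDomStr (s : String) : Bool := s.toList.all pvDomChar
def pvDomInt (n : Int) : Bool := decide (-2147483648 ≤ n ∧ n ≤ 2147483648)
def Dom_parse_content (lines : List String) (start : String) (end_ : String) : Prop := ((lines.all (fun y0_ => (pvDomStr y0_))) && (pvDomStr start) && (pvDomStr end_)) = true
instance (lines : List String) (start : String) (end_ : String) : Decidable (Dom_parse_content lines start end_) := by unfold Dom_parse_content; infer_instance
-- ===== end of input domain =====

-- B replaces A's single stateful gated pass by an index-building pass plus a pivot-keyed
-- second pass on the first start index (objective: simpler decomposition; same cost).

-- ===== PORT A =====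
-- string.punctuation
def pvPunct : String := "!\"#$%&'()*+,-./:;<=>?@[\\]^_`{|}~"

-- tokenize(lines): split each line on whitespace, strip punctuation, casefold.
-- casefold = lower on the ASCII domain Dom_parse_content guarantees.
def tokenize (lines : List String) : List String :=
  lines.flatMap (fun line =>
    (PySem.Str.split₀ line).map (fun w => PySem.Str.lower (PySem.Str.stripChars w pvPunct)))

def parse_content (lines : List String) (start : String) (end_ : String) : List Int × List Int :=
  (PySem.List.enumerate (tokenize lines) 0).foldl
    (fun (st : List Int × List Int) p =>
      let sp := if p.2 == start then st.1 ++ [p.1] else st.1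
      let ep := if !sp.isEmpty && p.2 == end_ then st.2 ++ [p.1] else st.2
      (sp, ep))
    ([], [])

-- ===== PORT B =====
def parse_content_alt (lines : List String) (start : String) (end_ : String) : List Int × List Int :=
  let enum := PySem.List.enumerate (tokenize lines) 0
  let start_positions := (enum.filter (fun p => p.2 == start)).map (·.1)
  match start_positions with
  | [] => ([], [])
  | first :: _ =>
      (start_positions, (enum.filter (fun p => p.2 == end_ && first ≤ p.1)).map (·.1))

-- ===== PRECONDITION & SPEC =====
def Spec_parse_content (lines : List String) (start : String) (end_ : String) (out : List Int × List Int) : Prop := out = parse_content_alt lines start end_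
instance (lines : List String) (start : String) (end_ : String) (out : List Int × List Int) : Decidable (Spec_parse_content lines start end_ out) := by unfold Spec_parse_content; infer_instance

-- ===== CLAIM (what is proved, stated in full; the proofs are below) =====
def Claim_equal_parse_content : Prop := ∀ (lines : List String) (start : String) (end_ : String), Dom_parse_content lines start end_ → Spec_parse_content lines start end_ (parse_content lines start end_)

-- ===== LEMMAS AND PROOFS =====

-- A's loop body, named for the proofs
def pvStep (start end_ : String) (st : List Int × List Int) (p : Int × String) : List Int × List Int :=
  let sp := if p.2 == start then st.1 ++ [p.1] else st.1
  let ep := if !sp.isEmpty && p.2 == end_ then st.2 ++ [p.1] else st.2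
  (sp, ep)

-- B's computation on an arbitrary enumerated list, named for the proofs
def pvAlt (start end_ : String) (l : List (Int × String)) : List Int × List Int :=
  match (l.filter (fun p => p.2 == start)).map (·.1) with
  | [] => ([], [])
  | first :: _ =>
      ((l.filter (fun p => p.2 == start)).map (·.1),
       (l.filter (fun p => p.2 == end_ && first ≤ p.1)).map (·.1))

-- Once a start has been recorded, A's gate is permanently open: the rest of the
-- loop appends every start index and every end index.
theorem pvStep_after (start end_ : String) (l : List (Int × String)) :
    ∀ sp ep : List Int, sp ≠ [] →
    l.foldl (pvStep start end_) (sp, ep)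
      = (sp ++ (l.filter (fun p => p.2 == start)).map (·.1),
         ep ++ (l.filter (fun p => p.2 == end_)).map (·.1)) := by
  induction l with
  | nil => intro sp ep _; simp
  | cons p rest ih =>
      intro sp ep hsp
      have hsp' : (if p.2 == start then sp ++ [p.1] else sp) ≠ [] := by
        by_cases h : p.2 == start <;> simp [h, hsp]
      rw [List.foldl_cons]
      show rest.foldl (pvStep start end_) (pvStep start end_ (sp, ep) p) = _
      by_cases hs : p.2 == start <;> by_cases he : p.2 == end_ <;>
      · have hstate : pvStep start end_ (sp, ep) p =
            ((if p.2 == start then sp ++ [p.1] else sp),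
             (if p.2 == end_ then ep ++ [p.1] else ep)) := by
          simp [pvStep, hs, he, hsp]
        rw [hstate, ih _ _ hsp']
        simp [hs, he, List.append_assoc]

-- Main equivalence on any index list with strictly increasing indices.
theorem pvMain (start end_ : String) (l : List (Int × String))
    (hl : l.Pairwise (fun p q => p.1 < q.1)) :
    l.foldl (pvStep start end_) ([], []) = pvAlt start end_ l := by
  induction l with
  | nil => simp [pvAlt]
  | cons p rest ih =>
      rw [List.pairwise_cons] at hl
      obtain ⟨hlt, hrest⟩ := hl
      rw [List.foldl_cons]
      show rest.foldl (pvStep start end_) (pvStep start end_ ([], []) p) = _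
      by_cases hs : p.2 == start
      · -- the head is a start: the gate opens now
        have hstate : pvStep start end_ ([], []) p =
            ([p.1], if p.2 == end_ then [p.1] else []) := by
          simp [pvStep, hs]
        rw [hstate, pvStep_after start end_ rest [p.1] _ (by simp)]
        have hfilt : rest.filter (fun q => q.2 == end_ && decide (p.1 ≤ q.1))
            = rest.filter (fun q => q.2 == end_) := by
          apply List.filter_congr
          intro q hq
          simp [le_of_lt (hlt q hq)]
        by_cases he : p.2 == end_ <;>
          simp [pvAlt, hs, he, hfilt]
      · -- the head is not a start: A drops it; B's filters drop it too
        have hstate : pvStep start end_ ([], []) p = ([], []) := by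
          simp [pvStep, hs]
        rw [hstate, ih hrest]
        rcases hfs : (rest.filter (fun q => q.2 == start)).map (·.1) with _ | ⟨first, tl⟩
        · simp [pvAlt, hs, hfs]
        · -- first is an index occurring in rest, hence p.1 < first
          have hmem : first ∈ (rest.filter (fun q => q.2 == start)).map (·.1) := by
            rw [hfs]; exact List.mem_cons_self
          rcases List.mem_map.mp hmem with ⟨q, hq, hq1⟩
          have hlt' : p.1 < first := hq1 ▸ hlt q (List.mem_of_mem_filter hq)
          simp [pvAlt, hs, hfs, not_le.mpr hlt']

theorem pvIncr (tokens : List String) :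
    (PySem.List.enumerate tokens 0).Pairwise (fun p q => p.1 < q.1) :=
  PySem.List.pairwise_lt_enumerate tokens 0

-- ===== VERDICT (by name: the statement is the Claim_ definition above) =====
theorem parse_content_spec : Claim_equal_parse_content := by
  intro lines start end_ _
  show parse_content lines start end_ = parse_content_alt lines start end_
  have h := pvMain start end_ (PySem.List.enumerate (tokenize lines) 0) (pvIncr (tokenize lines))
  exact h
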